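-- pv_equiv track=rewrite | github.com/implisense/coypu-kg-analyser | coypu_kg_analyser/parametrizer/_common.py | _extract_uri_suffix
-- ===== SOURCE A (Python) =====
-- def _extract_uri_suffix(uri: str) -> str:
--     """Extrahiert den letzten Teil einer URI (nach #, / oder :)."""
--     for sep in ("#", "/", ":"):
--         if sep in uri:
--             suffix = uri.rsplit(sep, 1)[-1]
--             # Restliche Separatoren auf dem Suffix weiter anwenden
--             for inner_sep in (":", "/"):
--                 if inner_sep in suffix:
--                     suffix = suffix.rsplit(inner_sep, 1)[-1]
--             return suffix
--     return uri
-- ===== SOURCE B (Python) =====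
-- def _extract_uri_suffix(uri: str) -> str:
--     """Extrahiert den letzten Teil einer URI (nach #, / oder :)."""
--     idx = max(uri.rfind('#'), uri.rfind('/'), uri.rfind(':'))
--     return uri[idx + 1:]
-- ===== Notes on version B (the rewrite author's own statement) =====
-- stated objective: simpler
-- what changed: Replaces the priority-ordered nested rsplit peeling with one computation: the maximum of the three rfind positions, followed by a single slice after it.
import Mathlib
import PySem

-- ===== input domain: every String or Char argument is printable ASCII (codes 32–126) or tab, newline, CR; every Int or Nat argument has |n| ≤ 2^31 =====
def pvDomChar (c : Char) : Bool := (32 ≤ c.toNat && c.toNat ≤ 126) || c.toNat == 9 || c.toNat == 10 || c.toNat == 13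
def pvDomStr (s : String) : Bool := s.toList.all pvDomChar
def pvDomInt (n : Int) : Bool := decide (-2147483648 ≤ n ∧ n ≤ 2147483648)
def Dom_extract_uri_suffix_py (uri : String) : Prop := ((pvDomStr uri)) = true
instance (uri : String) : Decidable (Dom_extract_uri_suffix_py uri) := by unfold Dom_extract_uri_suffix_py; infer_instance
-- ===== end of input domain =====

-- B replaces A's priority-ordered nested rsplit peeling by one max-of-rfind-positions plus a single slice (objective: simpler).

-- ===== PORT A =====
-- hand port of s.rsplit(c, 1)[-1] for a single-char separator: everything after the
-- last occurrence of c, or s unchanged if c is absent (exact for single-char seps).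
def pvTail (c : Char) (cs : List Char) : List Char :=
  (cs.reverse.takeWhile (fun x => x != c)).reverse

-- A's inner for-loop over (":", "/"), unrolled (the tuple is a fixed literal).
def pvInner (s : List Char) : List Char :=
  let s1 := if PySem.Chars.isIn [':'] s then pvTail ':' s else s
  if PySem.Chars.isIn ['/'] s1 then pvTail '/' s1 else s1

-- A's outer for-loop over ("#", "/", ":"), unrolled: first separator present wins.
def extract_uri_suffix_py (uri : String) : String :=
  let cs := uri.toList
  if PySem.Chars.isIn ['#'] cs then String.ofList (pvInner (pvTail '#' cs))
  else if PySem.Chars.isIn ['/'] cs then String.ofList (pvInner (pvTail '/' cs))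
  else if PySem.Chars.isIn [':'] cs then String.ofList (pvInner (pvTail ':' cs))
  else uri

-- ===== PORT B =====
def extract_uri_suffix_py_alt (uri : String) : String :=
  let idx := max (max (PySem.Str.rfind uri "#") (PySem.Str.rfind uri "/")) (PySem.Str.rfind uri ":")
  PySem.Str.slice uri (some (idx + 1)) none

-- ===== PRECONDITION & SPEC =====
def Spec_extract_uri_suffix_py (uri : String) (out : String) : Prop := out = extract_uri_suffix_py_alt uri
instance (uri : String) (out : String) : Decidable (Spec_extract_uri_suffix_py uri out) := by unfold Spec_extract_uri_suffix_py; infer_instance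

-- ===== CLAIM (what is proved, stated in full; the proofs are below) =====
def Claim_equal_extract_uri_suffix_py : Prop := ∀ (uri : String), Dom_extract_uri_suffix_py uri → Spec_extract_uri_suffix_py uri (extract_uri_suffix_py uri)

-- ===== LEMMAS AND PROOFS =====

-- the "not a separator" predicate: A's final suffix is the longest suffix of such chars
def pvKeep (x : Char) : Bool := x != '#' && x != '/' && x != ':'

-- the maximum of the three rfind positions, on the list side
def pvMax3 (cs : List Char) : Int :=
  max (max (PySem.Chars.rfind cs ['#']) (PySem.Chars.rfind cs ['/'])) (PySem.Chars.rfind cs [':'])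

lemma pv_go_zero (s sub : List Char) :
    PySem.Chars.rfind.go s sub 0 = if sub.isPrefixOf s then 0 else -1 := by
  simp [PySem.Chars.rfind.go]

lemma pv_go_succ (s sub : List Char) (j : Nat) :
    PySem.Chars.rfind.go s sub (j + 1) =
      if sub.isPrefixOf (s.drop (j + 1)) then ((j : Int) + 1) else PySem.Chars.rfind.go s sub j := by
  simp [PySem.Chars.rfind.go]

lemma pv_go_append (l : List Char) (a c : Char) :
    ∀ k, k < l.length → PySem.Chars.rfind.go (l ++ [a]) [c] k = PySem.Chars.rfind.go l [c] k := by
  intro k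
  induction k with
  | zero =>
    intro h
    cases l with
    | nil => simp at h
    | cons x t => simp [pv_go_zero, List.isPrefixOf]
  | succ j ih =>
    intro h
    rw [pv_go_succ, pv_go_succ]
    have hlt : j + 1 < l.length := h
    have hdrop : (l ++ [a]).drop (j + 1) = l.drop (j + 1) ++ [a] :=
      List.drop_append_of_le_length (by omega)
    have hne : l.drop (j + 1) ≠ [] := by
      intro hnil
      have := List.length_drop (l := l) (i := j + 1)
      rw [hnil] at this
      simp at this
      omega
    obtain ⟨y, t, hyt⟩ := List.exists_cons_of_ne_nil hne
    rw [hdrop, hyt]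
    simp only [List.cons_append, List.isPrefixOf]
    rw [ih (by omega)]
    rfl

lemma pv_rfind_nil (c : Char) : PySem.Chars.rfind [] [c] = -1 := by
  simp [PySem.Chars.rfind, pv_go_zero, List.isPrefixOf]

lemma pv_rfind_append (l : List Char) (a c : Char) :
    PySem.Chars.rfind (l ++ [a]) [c] = if a = c then (l.length : Int) else PySem.Chars.rfind l [c] := by
  cases l with
  | nil =>
    simp [PySem.Chars.rfind, pv_go_succ, pv_go_zero, List.isPrefixOf]
    by_cases h : a = c
    · subst h; simp
    · simp [h]
      exact fun hh => h hh.symm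
  | cons x t =>
    show PySem.Chars.rfind ((x :: t) ++ [a]) [c] = _
    unfold PySem.Chars.rfind
    have hlen : ((x :: t) ++ [a]).length = t.length + 1 + 1 := by simp
    rw [hlen, pv_go_succ]
    have h1 : ((x :: t) ++ [a]).drop (t.length + 1 + 1) = [] := by
      apply List.drop_eq_nil_of_le; simp
    rw [h1]
    simp only [List.isPrefixOf, if_false, Bool.false_eq_true]
    rw [pv_go_succ]
    have h2 : ((x :: t) ++ [a]).drop (t.length + 1) = [a] := by
      rw [List.drop_append_of_le_length (by simp)]
      simp
    rw [h2]
    by_cases hac : a = c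
    · subst hac
      simp [List.isPrefixOf]
    · have : ([c].isPrefixOf [a]) = false := by
        simp [List.isPrefixOf]
        exact fun hh => hac hh.symm
      rw [this]
      simp only [Bool.false_eq_true, if_false, hac]
      rw [pv_go_append _ _ _ _ (by simp)]
      have hlen2 : (x :: t).length = t.length + 1 := by simp
      rw [hlen2, pv_go_succ]
      have h3 : (x :: t).drop (t.length + 1) = [] := by
        apply List.drop_eq_nil_of_le; simp
      rw [h3]
      simp [List.isPrefixOf]

lemma pv_rfind_ge (cs : List Char) (c : Char) : -1 ≤ PySem.Chars.rfind cs [c] := by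
  induction cs using List.reverseRecOn with
  | nil => rw [pv_rfind_nil]
  | append_singleton l a ih =>
    rw [pv_rfind_append]
    split
    · omega
    · exact ih

lemma pv_rfind_lt (cs : List Char) (c : Char) : PySem.Chars.rfind cs [c] < cs.length := by
  induction cs using List.reverseRecOn with
  | nil => rw [pv_rfind_nil]; simp
  | append_singleton l a ih =>
    rw [pv_rfind_append]
    have : ((l ++ [a]).length : Int) = l.length + 1 := by simp
    rw [this]
    split
    · omega
    · omega

lemma pv_isIn_singleton (c : Char) (cs : List Char) :
    PySem.Chars.isIn [c] cs = true ↔ c ∈ cs := by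
  rw [PySem.Chars.isIn_iff_infix]
  constructor
  · intro h
    exact h.mem (by simp)
  · intro h
    obtain ⟨s, t, rfl⟩ := List.append_of_mem h
    exact ⟨s, t, by simp⟩

lemma pv_takeWhile_congr_mem {l : List Char} {p q : Char → Bool}
    (h : ∀ x ∈ l, p x = q x) : l.takeWhile p = l.takeWhile q := by
  induction l with
  | nil => rfl
  | cons x t ih =>
    simp only [List.takeWhile_cons]
    rw [h x (by simp)]
    split
    · rw [ih (fun y hy => h y (by simp [hy]))]
    · rfl

lemma pv_pvTail_of_not_mem {c : Char} {cs : List Char} (h : c ∉ cs) : pvTail c cs = cs := by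
  unfold pvTail
  rw [List.takeWhile_eq_self_iff.mpr, List.reverse_reverse]
  intro x hx
  simp only [bne_iff_ne, ne_eq]
  intro hxc
  exact h (by rwa [hxc, List.mem_reverse] at hx)

-- the membership guard before a pvTail application is redundant
lemma pv_guard (c : Char) (cs : List Char) :
    (if PySem.Chars.isIn [c] cs then pvTail c cs else cs) = pvTail c cs := by
  split
  · rfl
  · next h =>
    rw [pv_pvTail_of_not_mem]
    intro hmem
    exact h ((pv_isIn_singleton c cs).mpr hmem)

-- pvInner applied after an outer pvTail collapses to three stacked takeWhiles on the reverse
lemma pv_inner_tail (c : Char) (cs : List Char) :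
    pvInner (pvTail c cs) =
      (((cs.reverse.takeWhile (fun x => x != c)).takeWhile (fun x => x != ':')).takeWhile
        (fun x => x != '/')).reverse := by
  unfold pvInner
  simp only [pv_guard]
  unfold pvTail
  rw [List.reverse_reverse, List.reverse_reverse]

-- core: dropping past the overall last separator equals keeping the trailing non-separator run
lemma pv_core (cs : List Char) :
    cs.drop ((1 + pvMax3 cs).toNat) = (cs.reverse.takeWhile pvKeep).reverse := by
  induction cs using List.reverseRecOn with
  | nil => simp [pvMax3, pv_rfind_nil]
  | append_singleton l a ih =>
    have h1 := pv_rfind_lt l '#'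
    have h2 := pv_rfind_lt l '/'
    have h3 := pv_rfind_lt l ':'
    have g1 := pv_rfind_ge l '#'
    have g2 := pv_rfind_ge l '/'
    have g3 := pv_rfind_ge l ':'
    by_cases hk : pvKeep a = true
    · have ha1 : a ≠ '#' := by simp [pvKeep] at hk; tauto
      have ha2 : a ≠ '/' := by simp [pvKeep] at hk; tauto
      have ha3 : a ≠ ':' := by simp [pvKeep] at hk; tauto
      have hm : pvMax3 (l ++ [a]) = pvMax3 l := by
        unfold pvMax3
        rw [pv_rfind_append, pv_rfind_append, pv_rfind_append]
        simp [ha1, ha2, ha3]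
      rw [hm]
      have hle : (1 + pvMax3 l).toNat ≤ l.length := by
        unfold pvMax3 at *
        omega
      rw [List.drop_append_of_le_length hle, ih]
      simp [hk]
    · have hm : pvMax3 (l ++ [a]) = (l.length : Int) := by
        unfold pvMax3
        rw [pv_rfind_append, pv_rfind_append, pv_rfind_append]
        have hsep : a = '#' ∨ a = '/' ∨ a = ':' := by
          simp [pvKeep] at hk; tauto
        rcases hsep with e | e | e
        · subst e
          rw [if_pos rfl, if_neg (by decide), if_neg (by decide)]
          omega
        · subst e
          rw [if_neg (by decide), if_pos rfl, if_neg (by decide)]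
          omega
        · subst e
          rw [if_neg (by decide), if_neg (by decide), if_pos rfl]
          omega
      rw [hm]
      have : (1 + (l.length : Int)).toNat = (l ++ [a]).length := by simp; omega
      rw [this, List.drop_length]
      have hka : pvKeep a = false := by simpa using hk
      simp [hka]

-- A collapses to the trailing non-separator run, in every branch
lemma pv_A_eq (uri : String) :
    (extract_uri_suffix_py uri).toList = (uri.toList.reverse.takeWhile pvKeep).reverse := by
  unfold extract_uri_suffix_py
  set cs := uri.toList with hcs
  by_cases hH : '#' ∈ cs
  · rw [if_pos ((pv_isIn_singleton _ _).mpr hH)]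
    rw [String.toList_ofList, pv_inner_tail]
    congr 1
    rw [List.takeWhile_takeWhile, List.takeWhile_takeWhile]
    apply pv_takeWhile_congr_mem
    intro x _
    by_cases h1 : x = '#' <;> by_cases h2 : x = '/' <;> by_cases h3 : x = ':' <;>
      simp_all [pvKeep]
  · rw [if_neg (by simpa [pv_isIn_singleton] using hH)]
    by_cases hS : '/' ∈ cs
    · rw [if_pos ((pv_isIn_singleton _ _).mpr hS)]
      rw [String.toList_ofList, pv_inner_tail]
      congr 1
      rw [List.takeWhile_takeWhile, List.takeWhile_takeWhile]
      apply pv_takeWhile_congr_mem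
      intro x hx
      have hxH : x ≠ '#' := by
        intro h; rw [List.mem_reverse] at hx; exact hH (h ▸ hx)
      by_cases h2 : x = '/' <;> by_cases h3 : x = ':' <;> simp_all [pvKeep]
    · rw [if_neg (by simpa [pv_isIn_singleton] using hS)]
      by_cases hC : ':' ∈ cs
      · rw [if_pos ((pv_isIn_singleton _ _).mpr hC)]
        rw [String.toList_ofList, pv_inner_tail]
        congr 1
        rw [List.takeWhile_takeWhile, List.takeWhile_takeWhile]
        apply pv_takeWhile_congr_mem
        intro x hx
        have hxH : x ≠ '#' := by
          intro h; rw [List.mem_reverse] at hx; exact hH (h ▸ hx)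
        have hxS : x ≠ '/' := by
          intro h; rw [List.mem_reverse] at hx; exact hS (h ▸ hx)
        by_cases h3 : x = ':' <;> simp_all [pvKeep]
      · rw [if_neg (by simpa [pv_isIn_singleton] using hC)]
        rw [List.takeWhile_eq_self_iff.mpr, List.reverse_reverse]
        intro x hx
        rw [List.mem_reverse] at hx
        have hxH : x ≠ '#' := fun h => hH (h ▸ hx)
        have hxS : x ≠ '/' := fun h => hS (h ▸ hx)
        have hxC : x ≠ ':' := fun h => hC (h ▸ hx)
        simp [pvKeep, hxH, hxS, hxC]

-- B computes the drop past the overall last separator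
lemma pv_B_eq (uri : String) :
    (extract_uri_suffix_py_alt uri).toList = uri.toList.drop ((1 + pvMax3 uri.toList).toNat) := by
  unfold extract_uri_suffix_py_alt
  have hmax : pvMax3 uri.toList =
      max (max (PySem.Str.rfind uri "#") (PySem.Str.rfind uri "/")) (PySem.Str.rfind uri ":") := by
    unfold pvMax3
    rw [PySem.Str.rfind_eq, PySem.Str.rfind_eq, PySem.Str.rfind_eq]
    rfl
  have h1 : PySem.Str.rfind uri "#" = PySem.Chars.rfind uri.toList ['#'] := by
    rw [PySem.Str.rfind_eq]
    rfl
  have hge : 0 ≤ max (max (PySem.Str.rfind uri "#") (PySem.Str.rfind uri "/")) (PySem.Str.rfind uri ":") + 1 := by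
    have := pv_rfind_ge uri.toList '#'
    rw [← h1] at this
    omega
  simp only [PySem.Str.toList_slice, PySem.Chars.slice_eq_listSlice]
  rw [PySem.List.slice_from _ hge, hmax]
  congr 1
  omega

-- ===== VERDICT (by name: the statement is the Claim_ definition above) =====
theorem extract_uri_suffix_py_spec : Claim_equal_extract_uri_suffix_py := by
  intro uri _
  unfold Spec_extract_uri_suffix_py
  apply String.toList_inj.mp
  rw [pv_A_eq, pv_B_eq, pv_core]
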